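-- pv_equiv track=rewrite | github.com/robinandreeklund-collab/CivicAI | scripts/train_dna_v2.py | extract_language_from_filename
-- ===== SOURCE A (Python) =====
-- def extract_language_from_filename(filename: str) -> str:
--     """
--     Extract language code from dataset filename.
--     Uses priority matching to handle multi-language filenames.
--
--     Args:
--         filename: Dataset filename or path
--
--     Returns:
--         str: Language code (en, sv, no, da, fi)
--     """
--     name_lower = filename.lower()
--
--     # Language mappings in priority order (most specific first)
--     language_patterns = [
--         ('svenska', 'sv'),
--         ('swedish', 'sv'),
--         ('svensk', 'sv'),
--         ('swed', 'sv'),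
--         ('norwegian', 'no'),
--         ('norsk', 'no'),
--         ('danish', 'da'),
--         ('dansk', 'da'),
--         ('finnish', 'fi'),
--         ('suomi', 'fi'),
--         ('english', 'en'),
--         ('eng', 'en'),
--     ]
--
--     # Find all matching languages
--     matches = []
--     for pattern, code in language_patterns:
--         if pattern in name_lower:
--             matches.append((pattern, code, name_lower.index(pattern)))
--
--     # If multiple matches, use the one that appears first in filename
--     if matches:
--         # Sort by position in filename (earliest first)
--         matches.sort(key=lambda x: x[2])
--         return matches[0][1]
--
--     # Default to English
--     return 'en'
-- ===== SOURCE B (Python) =====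
-- def extract_language_from_filename(filename: str) -> str:
--     """
--     Extract language code from dataset filename.
--     Single left-to-right scan: at each start position, try the patterns in
--     priority order and return on the first that matches there.
--     """
--     name_lower = filename.lower()
--
--     language_patterns = [
--         ('svenska', 'sv'),
--         ('swedish', 'sv'),
--         ('svensk', 'sv'),
--         ('swed', 'sv'),
--         ('norwegian', 'no'),
--         ('norsk', 'no'),
--         ('danish', 'da'),
--         ('dansk', 'da'),
--         ('finnish', 'fi'),
--         ('suomi', 'fi'),
--         ('english', 'en'),
--         ('eng', 'en'),
--     ]
--
--     for j in range(len(name_lower)):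
--         for pattern, code in language_patterns:
--             if name_lower.startswith(pattern, j):
--                 return code
--
--     return 'en'
-- ===== Notes on version B (the rewrite author's own statement) =====
-- stated objective: alternative
-- what changed: Replaces A's collect-all-matches-with-first-index then stable-sort-by-position pipeline with a single left-to-right scan over start positions that tries the patterns in priority order at each position and returns on the first hit.
import Mathlib
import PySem

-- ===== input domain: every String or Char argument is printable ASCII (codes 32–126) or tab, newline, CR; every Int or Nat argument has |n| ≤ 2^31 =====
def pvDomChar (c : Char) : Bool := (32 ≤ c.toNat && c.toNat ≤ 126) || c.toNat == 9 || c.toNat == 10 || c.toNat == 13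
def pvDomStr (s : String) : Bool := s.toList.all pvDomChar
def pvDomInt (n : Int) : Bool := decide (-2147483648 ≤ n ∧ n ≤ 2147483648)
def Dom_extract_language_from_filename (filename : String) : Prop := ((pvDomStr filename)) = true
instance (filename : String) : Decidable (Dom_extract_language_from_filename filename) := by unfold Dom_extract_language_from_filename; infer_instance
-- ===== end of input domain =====

-- B replaces A's collect-all-matches-then-stable-sort-by-position with a single
-- left-to-right scan that tries the patterns in priority order at each start position
-- (objective: alternative decomposition, no match list and no sort).

-- ===== PORT A =====
-- shared data constant: the priority-ordered (pattern, code) table of the Python source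
def langPatterns : List (List Char × String) :=
  [("svenska".toList, "sv"), ("swedish".toList, "sv"), ("svensk".toList, "sv"),
   ("swed".toList, "sv"), ("norwegian".toList, "no"), ("norsk".toList, "no"),
   ("danish".toList, "da"), ("dansk".toList, "da"), ("finnish".toList, "fi"),
   ("suomi".toList, "fi"), ("english".toList, "en"), ("eng".toList, "en")]

def extract_language_from_filename (filename : String) : String :=
  let nameLower := PySem.Chars.lower filename.toList
  let matchList := langPatterns.foldl
    (fun acc pc =>
      if PySem.Chars.isIn pc.1 nameLower then
        acc ++ [(pc.1, pc.2, PySem.Chars.find nameLower pc.1)]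
      else acc) []
  match PySem.List.sorted matchList (fun x => x.2.2) false with
  | [] => "en"
  | m :: _ => m.2.1

-- ===== PORT B =====
-- inner loop of B: try the patterns in priority order at the current position
def tryPatternsAt (s : List Char) : List (List Char × String) → Option String
  | [] => none
  | pc :: rest => if PySem.Chars.startswith s pc.1 then some pc.2 else tryPatternsAt s rest

-- outer loop of B: scan the start positions (suffixes) left to right
def scanPositions : List Char → String
  | [] => "en"
  | x :: t =>
    match tryPatternsAt (x :: t) langPatterns with
    | some c => c
    | none => scanPositions t

def extract_language_from_filename_alt (filename : String) : String :=
  scanPositions (PySem.Chars.lower filename.toList)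

-- ===== PRECONDITION & SPEC =====
def Spec_extract_language_from_filename (filename : String) (out : String) : Prop := out = extract_language_from_filename_alt filename
instance (filename : String) (out : String) : Decidable (Spec_extract_language_from_filename filename out) := by unfold Spec_extract_language_from_filename; infer_instance

-- ===== CLAIM (what is proved, stated in full; the proofs are below) =====
def Claim_equal_extract_language_from_filename : Prop := ∀ (filename : String), Dom_extract_language_from_filename filename → Spec_extract_language_from_filename filename (extract_language_from_filename filename)

-- ===== LEMMAS AND PROOFS =====

-- the key A sorts by: the position of the match
def pvKey (m : List Char × String × Int) : Int := m.2.2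

-- A's match list, in filter/map form
def pvMatches (s : List Char) (PL : List (List Char × String)) : List (List Char × String × Int) :=
  (PL.filter (fun pc => PySem.Chars.isIn pc.1 s)).map (fun pc => (pc.1, pc.2, PySem.Chars.find s pc.1))

-- running "first minimum" step, and the head of A's stable sort as a fold
def pvMinStep {α : Type} (key : α → Int) (h y : α) : α := if key y < key h then y else h

def pvFamOpt {α : Type} (key : α → Int) : List α → Option α
  | [] => none
  | x :: t => some (t.foldl (pvMinStep key) x)

theorem pvHead_insertBy {α : Type} (key : α → Int) (x : α) (acc : List α) :
    (PySem.List.insertBy (fun a b => decide (key a < key b)) x acc).head? =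
      match acc.head? with
      | none => some x
      | some h => some (pvMinStep key h x) := by
  cases acc with
  | nil => rfl
  | cons y t =>
    simp only [PySem.List.insertBy, pvMinStep]
    by_cases h : key x < key y <;> simp [h]

theorem pvFoldl_some {α : Type} (key : α → Int) (t : List α) (x : α) :
    t.foldl (fun o y => match o with
      | none => some y
      | some h => some (pvMinStep key h y)) (some x) = some (t.foldl (pvMinStep key) x) := by
  induction t generalizing x with
  | nil => rfl
  | cons y t ih => simp [List.foldl_cons, ih]

theorem pvSorted_head {α : Type} (key : α → Int) (l : List α) :
    (PySem.List.sorted l key false).head? = pvFamOpt key l := by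
  rw [PySem.List.sorted_eq_foldl_insertBy]
  have inv : ∀ (l : List α) (acc : List α),
      (l.foldl (fun acc x => PySem.List.insertBy (fun a b => decide (key a < key b)) x acc) acc).head? =
        l.foldl (fun o x => match o with
          | none => some x
          | some h => some (pvMinStep key h x)) acc.head? := by
    intro l
    induction l with
    | nil => intro acc; rfl
    | cons x t ih =>
      intro acc
      simp only [List.foldl_cons, ih, pvHead_insertBy]
  rw [inv]
  cases l with
  | nil => rfl
  | cons x t => simp [pvFamOpt, pvFoldl_some]

theorem pvFam_of_min {α : Type} (key : α → Int) (t : List α) (x : α)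
    (h : ∀ y ∈ t, key x ≤ key y) : t.foldl (pvMinStep key) x = x := by
  induction t generalizing x with
  | nil => rfl
  | cons y t ih =>
    have hy : ¬ key y < key x := not_lt.mpr (h y (by simp))
    simp only [List.foldl_cons, pvMinStep, if_neg hy]
    exact ih x (fun z hz => h z (by simp [hz]))

theorem pvFam_mid {α : Type} (key : α → Int) (m : α) (l₂ : List α)
    (h₂ : ∀ y ∈ l₂, key m ≤ key y) :
    ∀ (l₁ : List α) (x : α), key m < key x → (∀ y ∈ l₁, key m < key y) →
      (l₁ ++ m :: l₂).foldl (pvMinStep key) x = m := by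
  intro l₁
  induction l₁ with
  | nil =>
    intro x hx _
    simp only [List.nil_append, List.foldl_cons, pvMinStep, if_pos hx]
    exact pvFam_of_min key l₂ m h₂
  | cons y l₁ ih =>
    intro x hx h₁
    have hy : key m < key y := h₁ y (by simp)
    simp only [List.cons_append, List.foldl_cons, pvMinStep]
    by_cases h : key y < key x
    · simp only [if_pos h]; exact ih y hy (fun z hz => h₁ z (by simp [hz]))
    · simp only [if_neg h]; exact ih x hx (fun z hz => h₁ z (by simp [hz]))

theorem pvFamOpt_eq {α : Type} (key : α → Int) (l₁ l₂ : List α) (m : α)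
    (h₁ : ∀ y ∈ l₁, key m < key y) (h₂ : ∀ y ∈ l₂, key m ≤ key y) :
    pvFamOpt key (l₁ ++ m :: l₂) = some m := by
  cases l₁ with
  | nil =>
    simp only [List.nil_append, pvFamOpt]
    exact congrArg some (pvFam_of_min key l₂ m h₂)
  | cons a l₁ =>
    simp only [List.cons_append, pvFamOpt]
    exact congrArg some (pvFam_mid key m l₂ h₂ l₁ a (h₁ a (by simp))
      (fun z hz => h₁ z (by simp [hz])))

theorem pvFam_map {α β : Type} (k₁ : α → Int) (k₂ : β → Int) (f : α → β)
    (hf : ∀ a b, k₂ (f a) < k₂ (f b) ↔ k₁ a < k₁ b) (l : List α) :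
    pvFamOpt k₂ (l.map f) = (pvFamOpt k₁ l).map f := by
  cases l with
  | nil => rfl
  | cons x t =>
    simp only [List.map_cons, pvFamOpt, Option.map_some]
    refine congrArg some ?_
    induction t generalizing x with
    | nil => rfl
    | cons y t ih =>
      simp only [List.map_cons, List.foldl_cons, pvMinStep]
      by_cases h : k₁ y < k₁ x
      · rw [if_pos ((hf y x).mpr h), if_pos h, ih]
      · rw [if_neg (fun hc => h ((hf y x).mp hc)), if_neg h, ih]

-- ---- string facts (patterns are nonempty) ----

theorem pvIsIn_nil (p : List Char) (hp : p ≠ []) : PySem.Chars.isIn p [] = false := by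
  rw [← Bool.not_eq_true, PySem.Chars.isIn_iff_infix]
  intro h
  exact hp (List.eq_nil_of_infix_nil h)

theorem pvIsIn_of_prefix {p s : List Char} (h : p <+: s) : PySem.Chars.isIn p s = true :=
  (PySem.Chars.isIn_iff_infix p s).mpr h.isInfix

theorem pvFind_eq_of_first {p s : List Char} (k : Nat)
    (h1 : p <+: s.drop k) (h2 : ∀ i < k, ¬ p <+: s.drop i) :
    PySem.Chars.find s p = (k : Int) := by
  have hin : PySem.Chars.isIn p s = true :=
    (PySem.Chars.exists_prefix_drop_iff_isIn p s).mp ⟨k, h1⟩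
  have hnn : 0 ≤ PySem.Chars.find s p :=
    (PySem.Chars.find_nonneg_iff s p).mpr ((PySem.Chars.isIn_iff_infix p s).mp hin)
  obtain ⟨hpre, hmin⟩ := PySem.Chars.find_spec hnn
  have : (PySem.Chars.find s p).toNat = k := by
    rcases lt_trichotomy (PySem.Chars.find s p).toNat k with h | h | h
    · exact absurd hpre (h2 _ h)
    · exact h
    · exact absurd h1 (hmin k h)
  omega

theorem pvFind_of_prefix {p s : List Char} (h : p <+: s) : PySem.Chars.find s p = 0 := by
  have := pvFind_eq_of_first 0 (by simpa using h) (by omega)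
  simpa using this

theorem pvFind_pos {p s : List Char} (hin : PySem.Chars.isIn p s = true)
    (hnp : ¬ p <+: s) : 0 < PySem.Chars.find s p := by
  have hnn : 0 ≤ PySem.Chars.find s p :=
    (PySem.Chars.find_nonneg_iff s p).mpr ((PySem.Chars.isIn_iff_infix p s).mp hin)
  rcases hnn.lt_or_eq with h | h
  · exact h
  · exfalso
    obtain ⟨hpre, _⟩ := PySem.Chars.find_spec hnn
    rw [← h] at hpre
    exact hnp (by simpa using hpre)

theorem pvIsIn_cons {p : List Char} {x : Char} {t : List Char}
    (hnp : ¬ p <+: (x :: t)) : PySem.Chars.isIn p (x :: t) = PySem.Chars.isIn p t := by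
  rw [Bool.eq_iff_iff, ← PySem.Chars.exists_prefix_drop_iff_isIn,
      ← PySem.Chars.exists_prefix_drop_iff_isIn]
  constructor
  · rintro ⟨j, hj⟩
    cases j with
    | zero => exact absurd hj hnp
    | succ j' => exact ⟨j', hj⟩
  · rintro ⟨j, hj⟩
    exact ⟨j + 1, hj⟩

theorem pvFind_cons {p : List Char} {x : Char} {t : List Char}
    (hnp : ¬ p <+: (x :: t)) (hin : PySem.Chars.isIn p t = true) :
    PySem.Chars.find (x :: t) p = PySem.Chars.find t p + 1 := by
  have hnn : 0 ≤ PySem.Chars.find t p :=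
    (PySem.Chars.find_nonneg_iff t p).mpr ((PySem.Chars.isIn_iff_infix p t).mp hin)
  obtain ⟨hpre, hmin⟩ := PySem.Chars.find_spec hnn
  have hk := pvFind_eq_of_first (s := x :: t) ((PySem.Chars.find t p).toNat + 1)
    (by simpa using hpre)
    (by
      intro i hi
      cases i with
      | zero => exact hnp
      | succ j => exact fun hc => hmin j (by omega) (by simpa using hc))
  omega

-- ---- the match list, recursively over the pattern list ----

theorem pvMatches_nil (PL : List (List Char × String)) (hne : ∀ pc ∈ PL, pc.1 ≠ []) :
    pvMatches [] PL = [] := by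
  induction PL with
  | nil => rfl
  | cons pc PL ih =>
    simp only [pvMatches, List.filter_cons, pvIsIn_nil pc.1 (hne pc (by simp))]
    exact ih (fun q hq => hne q (by simp [hq]))

theorem pvMem_matches {s : List Char} {PL : List (List Char × String)}
    {m : List Char × String × Int} (hm : m ∈ pvMatches s PL) :
    ∃ pc ∈ PL, PySem.Chars.isIn pc.1 s = true ∧ m = (pc.1, pc.2, PySem.Chars.find s pc.1) := by
  simp only [pvMatches, List.mem_map, List.mem_filter] at hm
  obtain ⟨pc, ⟨hmem, hin⟩, rfl⟩ := hm
  exact ⟨pc, hmem, hin, rfl⟩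

theorem pvMatches_append (s : List Char) (L₁ L₂ : List (List Char × String)) :
    pvMatches s (L₁ ++ L₂) = pvMatches s L₁ ++ pvMatches s L₂ := by
  simp [pvMatches, List.filter_append]

theorem pvMatches_shift {x : Char} {t : List Char} (PL : List (List Char × String))
    (h : ∀ pc ∈ PL, ¬ pc.1 <+: (x :: t)) :
    pvMatches (x :: t) PL = (pvMatches t PL).map (fun m => (m.1, m.2.1, m.2.2 + 1)) := by
  induction PL with
  | nil => rfl
  | cons pc PL ih =>
    have hnp : ¬ pc.1 <+: (x :: t) := h pc (by simp)
    have ih' := ih (fun q hq => h q (by simp [hq]))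
    simp only [pvMatches, List.filter_cons, pvIsIn_cons hnp]
    by_cases hin : PySem.Chars.isIn pc.1 t = true
    · simp only [hin, if_pos, List.map_cons, pvFind_cons hnp hin]
      exact congrArg _ (by simpa [pvMatches] using ih')
    · simp only [Bool.not_eq_true] at hin
      simp only [hin, Bool.false_eq_true, if_neg, not_false_iff]
      simpa [pvMatches] using ih'

-- ---- B's inner loop, characterised ----

theorem pvTry_none {s : List Char} {PL : List (List Char × String)}
    (h : tryPatternsAt s PL = none) : ∀ pc ∈ PL, ¬ pc.1 <+: s := by
  induction PL with
  | nil => simp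
  | cons pc PL ih =>
    simp only [tryPatternsAt] at h
    by_cases hs : PySem.Chars.startswith s pc.1 = true
    · simp [hs] at h
    · rw [if_neg hs] at h
      intro q hq
      rcases List.mem_cons.mp hq with rfl | hq'
      · exact fun hc => hs ((PySem.Chars.startswith_iff s q.1).mpr hc)
      · exact ih h q hq'

theorem pvTry_some {s : List Char} {c : String} :
    ∀ {PL : List (List Char × String)}, tryPatternsAt s PL = some c →
      ∃ l₁ p l₂, PL = l₁ ++ (p, c) :: l₂ ∧ p <+: s ∧ ∀ pc ∈ l₁, ¬ pc.1 <+: s := by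
  intro PL
  induction PL with
  | nil => simp [tryPatternsAt]
  | cons pc PL ih =>
    intro h
    simp only [tryPatternsAt] at h
    by_cases hs : PySem.Chars.startswith s pc.1 = true
    · rw [if_pos hs] at h
      refine ⟨[], pc.1, PL, ?_, (PySem.Chars.startswith_iff s pc.1).mp hs, by simp⟩
      simp only [List.nil_append]
      cases h
      rfl
    · rw [if_neg hs] at h
      obtain ⟨l₁, p, l₂, rfl, hp, hl₁⟩ := ih h
      refine ⟨pc :: l₁, p, l₂, rfl, hp, ?_⟩
      intro q hq
      rcases List.mem_cons.mp hq with rfl | hq'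
      · exact fun hc => hs ((PySem.Chars.startswith_iff s q.1).mpr hc)
      · exact hl₁ q hq'

-- ---- main induction: A's argmin-of-matches equals B's scan ----

theorem pvMain (s : List Char) :
    (match pvFamOpt pvKey (pvMatches s langPatterns) with
     | none => "en"
     | some m => m.2.1) = scanPositions s := by
  induction s with
  | nil =>
    rw [pvMatches_nil langPatterns (by decide)]
    rfl
  | cons x t ih =>
    cases htry : tryPatternsAt (x :: t) langPatterns with
    | none =>
      have hshift := pvMatches_shift langPatterns (pvTry_none htry)
      rw [hshift, pvFam_map pvKey pvKey (fun m => (m.1, m.2.1, m.2.2 + 1))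
        (by intro a b; simp only [pvKey]; omega)]
      have hscan : scanPositions (x :: t) = scanPositions t := by
        simp [scanPositions, htry]
      rw [hscan, ← ih]
      cases pvFamOpt pvKey (pvMatches t langPatterns) with
      | none => rfl
      | some m => rfl
    | some c =>
      obtain ⟨l₁, p, l₂, hPL, hp, hl₁⟩ := pvTry_some htry
      have hfind : PySem.Chars.find (x :: t) p = 0 := pvFind_of_prefix hp
      have hsplit : pvMatches (x :: t) langPatterns =
          pvMatches (x :: t) l₁ ++ (p, c, (0 : Int)) :: pvMatches (x :: t) l₂ := by
        rw [hPL, pvMatches_append]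
        congr 1
        simp [pvMatches, pvIsIn_of_prefix hp, hfind]
      have h₁ : ∀ y ∈ pvMatches (x :: t) l₁, pvKey (p, c, (0 : Int)) < pvKey y := by
        intro y hy
        obtain ⟨pc, hmem, hin, rfl⟩ := pvMem_matches hy
        have hnp : ¬ pc.1 <+: (x :: t) := hl₁ pc hmem
        simpa [pvKey] using pvFind_pos hin hnp
      have h₂ : ∀ y ∈ pvMatches (x :: t) l₂, pvKey (p, c, (0 : Int)) ≤ pvKey y := by
        intro y hy
        obtain ⟨pc, _, hin, rfl⟩ := pvMem_matches hy
        simpa [pvKey] using (PySem.Chars.find_nonneg_iff (x :: t) pc.1).mpr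
          ((PySem.Chars.isIn_iff_infix pc.1 (x :: t)).mp hin)
      rw [hsplit, pvFamOpt_eq pvKey _ _ _ h₁ h₂]
      simp [scanPositions, htry]

-- ---- bridging the two ports to the proof-side forms ----

theorem pvA_eq (filename : String) :
    extract_language_from_filename filename =
      (match pvFamOpt pvKey (pvMatches (PySem.Chars.lower filename.toList) langPatterns) with
       | none => "en"
       | some m => m.2.1) := by
  show (match PySem.List.sorted
      (langPatterns.foldl
        (fun acc pc =>
          if PySem.Chars.isIn pc.1 (PySem.Chars.lower filename.toList) then
            acc ++ [(pc.1, pc.2, PySem.Chars.find (PySem.Chars.lower filename.toList) pc.1)]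
          else acc) []) (fun x => x.2.2) false with
    | [] => "en"
    | m :: _ => m.2.1) = _
  rw [PySem.List.foldl_append_if
    (fun pc => PySem.Chars.isIn pc.1 (PySem.Chars.lower filename.toList))
    (fun pc => (pc.1, pc.2, PySem.Chars.find (PySem.Chars.lower filename.toList) pc.1))
    langPatterns []]
  have hhead := pvSorted_head (fun x : List Char × String × Int => x.2.2)
    (pvMatches (PySem.Chars.lower filename.toList) langPatterns)
  have hkey : pvKey = (fun x : List Char × String × Int => x.2.2) := rfl
  rw [hkey]
  simp only [List.nil_append]
  have hfold : List.map (fun pc => (pc.1, pc.2, PySem.Chars.find (PySem.Chars.lower filename.toList) pc.1))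
      (List.filter (fun pc => PySem.Chars.isIn pc.1 (PySem.Chars.lower filename.toList)) langPatterns) =
      pvMatches (PySem.Chars.lower filename.toList) langPatterns := rfl
  rw [hfold]
  cases hs : PySem.List.sorted (pvMatches (PySem.Chars.lower filename.toList) langPatterns)
      (fun x => x.2.2) false with
  | nil =>
    rw [hs] at hhead
    simp only [List.head?_nil] at hhead
    rw [← hhead]
  | cons m rest =>
    rw [hs] at hhead
    simp only [List.head?_cons] at hhead
    rw [← hhead]

-- ===== VERDICT (by name: the statement is the Claim_ definition above) =====
theorem extract_language_from_filename_spec : Claim_equal_extract_language_from_filename := by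
  intro filename _
  unfold Spec_extract_language_from_filename extract_language_from_filename_alt
  rw [pvA_eq, pvMain]
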